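-- pv_equiv track=rewrite | github.com/wflynny/amoeba-segmenter | code/amoeba_segmenter/platemap.py | serpentine
-- ===== SOURCE A (Python) =====
-- from string import ascii_uppercase
--
-- def serpentine(nrows=8, ncols=12):
--     rows = list(ascii_uppercase[:nrows])
--     cols = [str(k) for k in range(1, ncols + 1)]
--     wells = []
--     for i, r in enumerate(rows):
--         for c in cols[:: 1 - 2 * (i % 2)]:
--             wells.append(r + c)
--     return dict(zip(wells, range(1, len(wells) + 1)))
-- ===== SOURCE B (Python) =====
-- from string import ascii_uppercase
--
-- def serpentine(nrows=8, ncols=12):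
--     # One flat loop over well indices; row/column recovered by divmod,
--     # serpentine column by arithmetic -- no intermediate wells list, no reversed slice.
--     rows = ascii_uppercase[:nrows]
--     m = max(ncols, 0)
--     out = {}
--     for k in range(len(rows) * m):
--         i, p = divmod(k, m)
--         j = p if i % 2 == 0 else m - 1 - p
--         out[rows[i] + str(j + 1)] = k + 1
--     return out
-- ===== Notes on version B (the rewrite author's own statement) =====
-- stated objective: simpler
-- what changed: B replaces A's nested loops over a direction-alternating reversed column slice plus an intermediate wells list zipped with a range by a single flat loop over well indices that recovers row, position and serpentine column with divmod arithmetic and writes into the dict directly.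
import Mathlib
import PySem

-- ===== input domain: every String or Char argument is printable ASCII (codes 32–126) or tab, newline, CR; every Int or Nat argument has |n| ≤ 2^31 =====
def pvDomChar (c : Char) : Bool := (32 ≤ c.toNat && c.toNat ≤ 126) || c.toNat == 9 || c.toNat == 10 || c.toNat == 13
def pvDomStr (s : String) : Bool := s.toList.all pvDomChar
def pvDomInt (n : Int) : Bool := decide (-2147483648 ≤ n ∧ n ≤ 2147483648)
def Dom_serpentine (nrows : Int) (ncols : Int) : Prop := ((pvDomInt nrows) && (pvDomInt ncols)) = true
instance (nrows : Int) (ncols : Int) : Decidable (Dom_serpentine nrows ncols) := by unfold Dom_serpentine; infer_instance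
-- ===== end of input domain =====

-- B replaces A's nested loops over a reversed column slice and the intermediate
-- `wells` list + zip by one flat loop over well indices with divmod arithmetic;
-- objective: simpler (no intermediate lists), same asymptotic cost.

-- string.ascii_uppercase
def pvAscii : List Char :=
  ['A','B','C','D','E','F','G','H','I','J','K','L','M',
   'N','O','P','Q','R','S','T','U','V','W','X','Y','Z']

-- ===== PORT A =====
def serpentine (nrows : Int) (ncols : Int) : List (String × Int) :=
  let rows := PySem.List.slice pvAscii none (some nrows)
  let cols := (PySem.List.pyRange 1 (ncols + 1) 1).map PySem.Int.toChars
  let wells := (PySem.List.enumerate rows 0).foldl (fun w ir =>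
      -- cols[:: 1 - 2 * (i % 2)]; the step is ±1, never 0, so .getD [] is a pure totality guard
      ((PySem.List.slice? cols none none (1 - 2 * PySem.Int.mod ir.1 2)).getD []).foldl
        (fun w c => w ++ [String.ofList (ir.2 :: c)]) w) []
  (PySem.Dict.ofList (wells.zip (PySem.List.pyRange 1 ((wells.length : Int) + 1) 1))).items

-- ===== PORT B =====
def serpentine_alt (nrows : Int) (ncols : Int) : List (String × Int) :=
  let rows := PySem.List.slice pvAscii none (some nrows)
  let m := max ncols 0
  ((PySem.List.pyRange 0 ((rows.length : Int) * m) 1).foldl (fun d k =>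
      let i := PySem.Int.floordiv k m
      let p := PySem.Int.mod k m
      let j := if PySem.Int.mod i 2 = 0 then p else m - 1 - p
      -- rows[i]: i < rows.length always holds inside the loop, so the 'A' default is a pure totality guard
      d.insert (String.ofList (PySem.List.pyGetD rows i 'A' :: PySem.Int.toChars (j + 1))) (k + 1))
    PySem.Dict.empty).items

-- ===== PRECONDITION & SPEC =====
def Spec_serpentine (nrows : Int) (ncols : Int) (out : List (String × Int)) : Prop := out = serpentine_alt nrows ncols
instance (nrows : Int) (ncols : Int) (out : List (String × Int)) : Decidable (Spec_serpentine nrows ncols out) := by unfold Spec_serpentine; infer_instance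

-- ===== CLAIM (what is proved, stated in full; the proofs are below) =====
def Claim_equal_serpentine : Prop := ∀ (nrows : Int) (ncols : Int), Dom_serpentine nrows ncols → Spec_serpentine nrows ncols (serpentine nrows ncols)

-- ===== LEMMAS AND PROOFS =====

theorem pv_filterMap_range {α : Type} (xs : List α) :
    List.filterMap (fun k => xs[k]?) (List.range xs.length) = xs := by
  induction xs using List.reverseRecOn with
  | nil => simp
  | append_singleton ys y ih =>
    rw [List.length_append, List.length_singleton, List.range_succ, List.filterMap_append]
    have h1 : List.filterMap (fun k => (ys ++ [y])[k]?) (List.range ys.length)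
        = List.filterMap (fun k => ys[k]?) (List.range ys.length) := by
      apply List.filterMap_congr
      intro k hk
      exact List.getElem?_append_left (List.mem_range.mp hk)
    rw [h1, ih]
    simp

-- xs[::1] = xs (no PySem lemma covers step 1 with no bounds)
theorem pv_slice?_one {α : Type} (xs : List α) : PySem.List.slice? xs none none 1 = some xs := by
  simp only [PySem.List.slice?, PySem.List.sliceIndices]
  norm_num
  have hif : (if 0 < xs.length then xs.length else 0) = xs.length := by split <;> omega
  rw [hif]
  exact pv_filterMap_range xs

-- (range M).reverse written as a map over range M
theorem pv_range_reverse (M : Nat) :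
    (List.range M).reverse = (List.range M).map (fun t => M - 1 - t) := by
  apply List.ext_getElem (by simp)
  intro i h1 h2
  simp [List.getElem_reverse]

-- the per-row column order of A, over a Nat row index
def pvCols (M : Nat) : List (List Char) :=
  (List.range M).map (fun (t : Nat) => PySem.Int.toChars (1 + (t : Int)))

def pvOrd (i M : Nat) : List (List Char) :=
  if i % 2 = 0 then pvCols M else (pvCols M).reverse

-- the pair B inserts for well index k (Nat form)
def pvB (rs : List Char) (M k : Nat) : String × Int :=
  (String.ofList (PySem.List.pyGetD rs (↑(k / M)) 'A' ::
      PySem.Int.toChars ((if (k / M) % 2 = 0 then ((k % M : Nat) : Int)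
        else (M : Int) - 1 - ((k % M : Nat) : Int)) + 1)),
   1 + (k : Int))

theorem pv_ord_len (i M : Nat) (r : Char) :
    ((pvOrd i M).map (fun c => String.ofList (r :: c))).length = M := by
  unfold pvOrd pvCols; split <;> simp

theorem pv_flat_len (M : Nat) (rs : List Char) (s : Int) :
    ((PySem.List.enumerate rs s).flatMap
      (fun ir => (pvOrd ir.1.toNat M).map (fun c => String.ofList (ir.2 :: c)))).length
    = rs.length * M := by
  induction rs generalizing s with
  | nil => simp [PySem.List.enumerate_nil]
  | cons x xs ih =>
    rw [PySem.List.enumerate_cons, List.flatMap_cons, List.length_append, ih, pv_ord_len,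
      List.length_cons, Nat.add_mul, Nat.one_mul]
    omega

-- dict(zip(wells, …)) as a foldl of inserts, generically
theorem pv_foldl_insert (l : List Int) (f : Int → String) (g : Int → Int) :
    l.foldl (fun d k => d.insert (f k) (g k)) PySem.Dict.empty
    = PySem.Dict.ofList (l.map fun k => (f k, g k)) := by
  have h : PySem.Dict.ofList (l.map fun k => (f k, g k))
      = (l.map fun k => (f k, g k)).foldl (fun d p => d.insert p.1 p.2) PySem.Dict.empty := rfl
  rw [h, List.foldl_map]

-- A's wells loop as a flatMap over serpentine-ordered column lists
theorem pv_wells (rows : List Char) (cols : List (List Char)) (M : Nat) (hc : cols = pvCols M) :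
    (PySem.List.enumerate rows 0).foldl (fun w ir =>
      ((PySem.List.slice? cols none none (1 - 2 * PySem.Int.mod ir.1 2)).getD []).foldl
        (fun w c => w ++ [String.ofList (ir.2 :: c)]) w) []
    = (PySem.List.enumerate rows 0).flatMap
        (fun ir => (pvOrd ir.1.toNat M).map (fun c => String.ofList (ir.2 :: c))) := by
  simp only [PySem.List.foldl_append_singleton_eq_map]
  rw [PySem.List.foldl_append_eq_flatMap, List.nil_append]
  apply List.flatMap_congr
  intro ir hir
  obtain ⟨k, hk, rfl⟩ := (PySem.List.mem_enumerate_iff rows 0 ir).mp hir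
  have h1 : PySem.Int.mod ((0 : Int) + (k : Int)) 2 = ((k % 2 : Nat) : Int) := by
    rw [Int.zero_add]; exact_mod_cast PySem.Int.mod_natCast k 2
  have ht : (((0 : Int) + (k : Int)) : Int).toNat = k := by omega
  rw [h1, ht]
  by_cases hk2 : k % 2 = 0
  · have hs : (1 : Int) - 2 * ((k % 2 : Nat) : Int) = 1 := by rw [hk2]; norm_num
    rw [hs, pv_slice?_one, Option.getD_some, hc]
    unfold pvOrd
    rw [if_pos hk2]
  · have hk1 : k % 2 = 1 := by omega
    have hs : (1 : Int) - 2 * ((k % 2 : Nat) : Int) = -1 := by rw [hk1]; norm_num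
    rw [hs, PySem.List.slice?_none_none_neg_one, Option.getD_some, hc]
    unfold pvOrd
    rw [if_neg hk2]

theorem pv_main (M : Nat) (hM : 0 < M) (rs : List Char) :
    (((PySem.List.enumerate rs 0).flatMap
        (fun ir => (pvOrd ir.1.toNat M).map (fun c => String.ofList (ir.2 :: c)))).zip
      ((List.range (rs.length * M)).map (fun (k : Nat) => (1 : Int) + (k : Int))))
    = (List.range (rs.length * M)).map (pvB rs M) := by
  induction rs using List.reverseRecOn with
  | nil => simp [PySem.List.enumerate_nil]
  | append_singleton rs r ih =>
    rw [PySem.List.enumerate_append, List.flatMap_append]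
    have hlen : (rs ++ [r]).length * M = rs.length * M + M := by
      rw [List.length_append, List.length_singleton, Nat.add_mul, Nat.one_mul]
    rw [hlen, List.range_add]
    simp only [List.map_append]
    rw [List.zip_append (by rw [pv_flat_len]; simp)]
    congr 1
    · rw [ih]
      apply List.map_congr_left
      intro k hkmem
      have hk : k < rs.length * M := List.mem_range.mp hkmem
      have hdiv : k / M < rs.length := (Nat.div_lt_iff_lt_mul hM).mpr hk
      unfold pvB
      rw [PySem.List.pyGetD_natCast, PySem.List.pyGetD_natCast,
        List.getD_append rs [r] 'A' (k / M) hdiv]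
    · simp only [PySem.List.enumerate_cons, PySem.List.enumerate_nil, List.flatMap_cons,
        List.flatMap_nil, List.append_nil]
      have ht : (((0 : Int) + (rs.length : Int)) : Int).toNat = rs.length := by omega
      rw [ht]
      simp only [List.map_map]
      unfold pvOrd
      by_cases hp : rs.length % 2 = 0
      · rw [if_pos hp]
        unfold pvCols
        simp only [List.map_map]
        rw [List.zip_map']
        apply List.map_congr_left
        intro t htmem
        have htM : t < M := List.mem_range.mp htmem
        have hdm : (rs.length * M + t) / M = rs.length := by
          rw [Nat.mul_comm rs.length M, Nat.mul_add_div hM, Nat.div_eq_of_lt htM, Nat.add_zero]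
        have hmm : (rs.length * M + t) % M = t := by
          rw [Nat.mul_comm rs.length M, Nat.mul_add_mod, Nat.mod_eq_of_lt htM]
        simp only [Function.comp_apply]
        unfold pvB
        rw [hdm, hmm, if_pos hp, PySem.List.pyGetD_natCast,
          List.getD_append_right rs [r] 'A' rs.length (le_refl _), Nat.sub_self]
        have hxy : ((t : Nat) : Int) + 1 = 1 + (t : Int) := by omega
        simp only [List.getD_cons_zero, Prod.mk.injEq]
        constructor
        · rw [hxy]
        · trivial
      · rw [if_neg hp]
        unfold pvCols
        rw [← List.map_reverse, pv_range_reverse]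
        simp only [List.map_map]
        rw [List.zip_map']
        apply List.map_congr_left
        intro t htmem
        have htM : t < M := List.mem_range.mp htmem
        have hdm : (rs.length * M + t) / M = rs.length := by
          rw [Nat.mul_comm rs.length M, Nat.mul_add_div hM, Nat.div_eq_of_lt htM, Nat.add_zero]
        have hmm : (rs.length * M + t) % M = t := by
          rw [Nat.mul_comm rs.length M, Nat.mul_add_mod, Nat.mod_eq_of_lt htM]
        simp only [Function.comp_apply]
        unfold pvB
        rw [hdm, hmm, if_neg hp, PySem.List.pyGetD_natCast,
          List.getD_append_right rs [r] 'A' rs.length (le_refl _), Nat.sub_self]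
        have hxy : (M : Int) - 1 - (t : Int) + 1 = 1 + ((M - 1 - t : Nat) : Int) := by omega
        simp only [List.getD_cons_zero, Prod.mk.injEq]
        constructor
        · rw [← hxy]
        · trivial

-- ===== VERDICT (by name: the statement is the Claim_ definition above) =====
theorem serpentine_spec : Claim_equal_serpentine := by
  unfold Claim_equal_serpentine Spec_serpentine
  intro nrows ncols _
  have h0 : (0 : Int) ≤ max ncols 0 := le_max_right _ _
  obtain ⟨M, hmax⟩ : ∃ M : Nat, (max ncols 0 : Int) = (M : Int) :=
    ⟨(max ncols 0).toNat, (Int.toNat_of_nonneg h0).symm⟩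
  simp only [serpentine, serpentine_alt]
  rw [hmax, pv_foldl_insert]
  have hcols : (PySem.List.pyRange 1 (ncols + 1) 1).map PySem.Int.toChars = pvCols M := by
    rw [PySem.List.pyRange_one, List.map_map]
    have harg : (ncols + 1 - 1).toNat = M := by omega
    rw [harg]
    unfold pvCols
    apply List.map_congr_left
    intro t _
    rfl
  rw [pv_wells _ _ M hcols, pv_flat_len M _ 0]
  have hvals : PySem.List.pyRange 1
      (((PySem.List.slice pvAscii none (some nrows)).length * M : Nat) + 1) 1
      = (List.range ((PySem.List.slice pvAscii none (some nrows)).length * M)).map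
          (fun (k : Nat) => (1 : Int) + (k : Int)) := by
    have harg2 : ((((PySem.List.slice pvAscii none (some nrows)).length * M : Nat) : Int) + 1 - 1).toNat
        = (PySem.List.slice pvAscii none (some nrows)).length * M := by omega
    rw [PySem.List.pyRange_one, harg2]
  rw [hvals]
  have hrange : PySem.List.pyRange 0
      (((PySem.List.slice pvAscii none (some nrows)).length : Int) * (M : Int)) 1
      = (List.range ((PySem.List.slice pvAscii none (some nrows)).length * M)).map
          (fun (k : Nat) => (k : Int)) := by
    rw [PySem.List.pyRange_one]
    have harg : (((PySem.List.slice pvAscii none (some nrows)).length : Int) * (M : Int) - 0).toNat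
        = (PySem.List.slice pvAscii none (some nrows)).length * M := by
      omega
    rw [harg]
    apply List.map_congr_left
    intro k _
    omega
  rw [hrange, List.map_map]
  by_cases hM : 0 < M
  · rw [pv_main M hM]
    apply congrArg (fun l => (PySem.Dict.ofList l).items)
    apply List.map_congr_left
    intro k _
    simp only [Function.comp_apply]
    have h1 : PySem.Int.floordiv (k : Int) (M : Int) = ((k / M : Nat) : Int) :=
      PySem.Int.floordiv_natCast k M
    have h2 : PySem.Int.mod (k : Int) (M : Int) = ((k % M : Nat) : Int) :=
      PySem.Int.mod_natCast k M
    have h3 : PySem.Int.mod ((k / M : Nat) : Int) 2 = ((k / M % 2 : Nat) : Int) := by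
      exact_mod_cast PySem.Int.mod_natCast (k / M) 2
    unfold pvB
    rw [h1, h2, h3]
    simp only [Nat.cast_eq_zero, Prod.mk.injEq]
    constructor
    · try rfl
      try trivial
    · omega
  · have hM0 : M = 0 := by omega
    subst hM0
    simp [pvOrd, pvCols]
-- ===== END =====
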